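-- pv_equiv track=rewrite | github.com/asigalov61/Meddleying-MAESTRO | MM_Generator.py | getSilences
-- ===== SOURCE A (Python) =====
-- def getSilences(test):
--     test=test[:-1] #removing last line in string (always blank)
--     output=test.split("\n") #splitting into array
--     res = len(output)
--     #initialising counters
--     maxcounter=0
--     counter=0
--     silenceCount=0
--
--     for x in output:
--         if x == "#": #when a "#" is seen nothing is being played that sample
--             counter=counter+1 #this tracks a streak of silences
--             silenceCount+=1 #this tracks total silences
--         if x != "#":
--             counter=0 #reseting streak
--         if counter>maxcounter:
--             maxcounter=counter #updating longest silence streak when appropriate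
--     return maxcounter,silenceCount
-- ===== SOURCE B (Python) =====
-- def getSilences(test):
--     test = test[:-1]
--     output = test.split("\n")
--     silenceCount = output.count("#")
--     best = 0
--     prev = -1
--     for i, x in enumerate(output):
--         if x != "#":
--             best = max(best, i - prev - 1)
--             prev = i
--     best = max(best, len(output) - prev - 1)
--     return best, silenceCount
-- ===== Notes on version B (the rewrite author's own statement) =====
-- stated objective: alternative
-- what changed: A's single element-wise pass with a reset streak counter is replaced by a separate list.count pass for the total silences plus a boundary-based longest-run scan that tracks the index of the last non-silence line.
import Mathlib
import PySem

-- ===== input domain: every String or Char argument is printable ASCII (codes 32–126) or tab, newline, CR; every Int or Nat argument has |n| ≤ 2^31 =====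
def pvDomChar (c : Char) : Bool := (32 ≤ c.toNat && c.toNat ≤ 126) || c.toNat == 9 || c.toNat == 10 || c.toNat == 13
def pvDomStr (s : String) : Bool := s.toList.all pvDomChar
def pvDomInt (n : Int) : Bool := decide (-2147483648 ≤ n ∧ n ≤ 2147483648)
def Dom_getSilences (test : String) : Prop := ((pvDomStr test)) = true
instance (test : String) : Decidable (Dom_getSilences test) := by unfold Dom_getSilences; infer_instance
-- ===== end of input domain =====

-- B replaces A's single element-wise pass (streak counter with reset) by a separate
-- `output.count("#")` pass plus a boundary-based longest-run scan over the indices of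
-- non-"#" lines (objective: simpler decomposition; same O(n) cost).

-- ===== PORT A =====
-- one loop iteration of A: the three ifs in A's order over state (maxcounter, counter, silenceCount)
def getSilencesStepA (acc : Int × Int × Int) (x : String) : Int × Int × Int :=
  let c := if x == "#" then acc.2.1 + 1 else acc.2.1
  let s := if x == "#" then acc.2.2 + 1 else acc.2.2
  let c := if x != "#" then 0 else c
  let m := if c > acc.1 then c else acc.1
  (m, c, s)

def getSilences (test : String) : Int × Int :=
  let test := String.ofList (PySem.List.slice test.toList none (some (-1)))   -- test[:-1]
  let output := (PySem.Str.split? test "\n").getD []                          -- test.split("\n"); sep nonempty, so split? = some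
  let st := output.foldl getSilencesStepA (0, 0, 0)
  (st.1, st.2.2)

-- ===== PORT B =====
-- one loop iteration of B over state (best, prev)
def getSilencesStepB (acc : Int × Int) (p : Int × String) : Int × Int :=
  if p.2 != "#" then (max acc.1 (p.1 - acc.2 - 1), p.1) else acc

def getSilences_alt (test : String) : Int × Int :=
  let test := String.ofList (PySem.List.slice test.toList none (some (-1)))   -- test[:-1]
  let output := (PySem.Str.split? test "\n").getD []                          -- test.split("\n"); sep nonempty, so split? = some
  let silenceCount : Int := PySem.List.count output "#"                       -- output.count("#")
  let st := (PySem.List.enumerate output).foldl getSilencesStepB (0, -1)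
  (max st.1 ((output.length : Int) - st.2 - 1), silenceCount)

-- ===== PRECONDITION & SPEC =====
def Spec_getSilences (test : String) (out : Int × Int) : Prop := out = getSilences_alt test
instance (test : String) (out : Int × Int) : Decidable (Spec_getSilences test out) := by unfold Spec_getSilences; infer_instance

-- ===== CLAIM (what is proved, stated in full; the proofs are below) =====
def Claim_equal_getSilences : Prop := ∀ (test : String), Dom_getSilences test → Spec_getSilences test (getSilences test)

-- ===== LEMMAS AND PROOFS =====

-- loop invariant linking A's eager max/streak state to B's boundary state:
-- m = max best c,  c = i - prev - 1,  both nonnegative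
theorem getSilences_loop (l : List String) (m c s best prev : Int) (i : Int)
    (hm : m = max best c) (hc : c = i - prev - 1) (hc0 : 0 ≤ c) (hb0 : 0 ≤ best) :
    (l.foldl getSilencesStepA (m, c, s)).1
      = max ((PySem.List.enumerate l i).foldl getSilencesStepB (best, prev)).1
          ((i + l.length) - ((PySem.List.enumerate l i).foldl getSilencesStepB (best, prev)).2 - 1)
    ∧ (l.foldl getSilencesStepA (m, c, s)).2.2 = s + (l.count "#" : Int) := by
  induction l generalizing m c s best prev i with
  | nil => simp [hm, hc]
  | cons x xs ih =>
    rw [PySem.List.enumerate_cons]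
    by_cases hx : x = "#"
    · subst hx
      have hstepA : getSilencesStepA (m, c, s) "#" = (max best (c + 1), c + 1, s + 1) := by
        simp [getSilencesStepA, hm]
        omega
      have hstepB : getSilencesStepB (best, prev) (i, "#") = (best, prev) := by
        simp [getSilencesStepB]
      have := ih (max best (c + 1)) (c + 1) (s + 1) best prev (i + 1)
        (by omega) (by omega) (by omega) hb0
      simp only [List.foldl_cons, hstepA, hstepB, List.count_cons, List.length_cons] at *
      constructor
      · rw [this.1]; congr 1; push_cast; ring
      · rw [this.2]; simp; ring
    · have hstepA : getSilencesStepA (m, c, s) x = (m, 0, s) := by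
        simp [getSilencesStepA, hx, hm]
        omega
      have hstepB : getSilencesStepB (best, prev) (i, x) = (max best c, i) := by
        simp [getSilencesStepB, hx, hc]
      have := ih m 0 s (max best c) i (i + 1)
        (by omega) (by omega) (by omega) (by omega)
      simp only [List.foldl_cons, hstepA, hstepB, List.count_cons, List.length_cons,
        beq_iff_eq] at *
      constructor
      · rw [this.1]; congr 2; push_cast; ring
      · rw [this.2]; simp [hx]
  
-- both ports, as functions of the split output list
theorem getSilences_ports_eq (output : List String) :
    ((output.foldl getSilencesStepA (0, 0, 0)).1, (output.foldl getSilencesStepA (0, 0, 0)).2.2)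
      = (max ((PySem.List.enumerate output).foldl getSilencesStepB (0, -1)).1
          ((output.length : Int) - ((PySem.List.enumerate output).foldl getSilencesStepB (0, -1)).2 - 1),
        (PySem.List.count output "#" : Int)) := by
  have h := getSilences_loop output 0 0 0 0 (-1) 0 (by omega) (by omega) (by omega) (by omega)
  simp only [zero_add] at h
  rw [Prod.ext_iff]
  refine ⟨?_, ?_⟩
  · rw [h.1]
  · rw [h.2]; simp [PySem.List.count_eq]

-- ===== VERDICT (by name: the statement is the Claim_ definition above) =====
theorem getSilences_spec : Claim_equal_getSilences := by
  intro test _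
  unfold Spec_getSilences getSilences getSilences_alt
  exact getSilences_ports_eq _
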